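-- pv_equiv track=rewrite | github.com/Ms-Kelly-Yu/LeetCode | main.py | contain3
-- ===== SOURCE A (Python) =====
-- def contain3(s, t):
--     state = [[-1] * len(t) for i in range(26)]
--     l = len(t)
--     for i in range(1, len(t) + 1):
--         for j in range(26):
--             state[j][-i] = state[j][-i + 1]
--         state[ord(t[-i]) - 97][-i] = l - i
--     index = -1
--     for i in range(len(s)):
--         if (index == -1 and i != 0) or index == l - 1:
--             return False
--         index = state[ord(s[i]) - 97][index + 1]
--     if index == -1:
--         return False
--     return True
-- ===== SOURCE B (Python) =====
-- def contain3(s, t):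
--     # Subsequence check: one consuming forward scan over t (iterator idiom).
--     it = iter(t)
--     return all(ch in it for ch in s)
-- ===== Notes on version B (the rewrite author's own statement) =====
-- stated objective: faster
-- what changed: Replaces the 26x|t| next-occurrence automaton table and its indexed walk with a single consuming forward scan over t (the iterator idiom all(ch in it for ch in s)); Pre_ restricts to the function's natural domain of lowercase strings, outside which A's ord(c)-97 row indexing raises IndexError or returns values via accidental negative-index row wraparound (aliasing 'G'..'`' onto 'a'..'z').
-- intended difference: On empty s, A returns False although the empty string is a subsequence of every t; B returns True, the conventionally intended value. — e.g. on contain3("", "b"): A returns false, B returns true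
-- outside the precondition, e.g. on contain3('G', 'a'): A returns True, B returns False; on contain3('{', 'a'): A raises IndexError, B returns False
import Mathlib
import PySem

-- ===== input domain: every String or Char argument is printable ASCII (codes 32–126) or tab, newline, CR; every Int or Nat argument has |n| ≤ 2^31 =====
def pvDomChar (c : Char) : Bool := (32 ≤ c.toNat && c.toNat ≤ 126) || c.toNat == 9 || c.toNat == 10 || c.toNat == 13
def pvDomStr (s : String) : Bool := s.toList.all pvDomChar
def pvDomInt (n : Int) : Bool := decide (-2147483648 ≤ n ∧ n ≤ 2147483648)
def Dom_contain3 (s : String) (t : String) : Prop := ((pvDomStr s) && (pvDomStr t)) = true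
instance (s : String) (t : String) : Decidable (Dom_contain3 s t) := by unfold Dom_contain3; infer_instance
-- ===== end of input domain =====

-- A builds a 26×|t| next-occurrence automaton table and walks it; B is a single consuming
-- forward scan over t (Python's iterator idiom) — faster by a large constant factor.
-- Pre_ restricts to strings over 'G'..'z' with no s-char aliasing a distinct t-char (A's
-- row table identifies c with c±26); on empty s A returns False where B returns True (D_ below).


-- ===== PORT A =====
-- 2D helpers: state[j][col] read / write with Python (possibly negative) indices.
def mget (st : List (List Int)) (j : Int) (col : Int) : Int :=
  PySem.List.pyGetD (PySem.List.pyGetD st j []) col (-1)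

def mset (st : List (List Int)) (j : Int) (col : Int) (v : Int) : List (List Int) :=
  PySem.List.pySetD st j (PySem.List.pySetD (PySem.List.pyGetD st j []) col v)

-- one iteration of A's build loop (the body for a given i of `for i in range(1, len(t)+1)`)
def buildStep (tl : List Char) (l : Int) (st : List (List Int)) (i : Int) : List (List Int) :=
  let st1 := (PySem.List.pyRange 0 26 1).foldl
      (fun st2 j => mset st2 j (-i) (mget st2 j (-i + 1))) st
  mset st1 (((PySem.List.pyGetD tl (-i) 'a').toNat : Int) - 97) (-i) (l - i)

def buildState (tl : List Char) : List (List Int) :=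
  (PySem.List.pyRange 1 (PySem.List.len tl + 1) 1).foldl
    (buildStep tl (PySem.List.len tl))
    ((PySem.List.pyRange 0 26 1).map (fun _ => List.replicate tl.length (-1)))

-- A's scan loop `for i in range(len(s))` with its early returns and the trailing check.
def scanA (state : List (List Int)) (l : Int) : List Char → Int → Int → Bool
  | [], _i, index => if index = -1 then false else true
  | c :: rest, i, index =>
    if (index = -1 ∧ i ≠ 0) ∨ index = l - 1 then false
    else scanA state l rest (i + 1) (mget state ((c.toNat : Int) - 97) (index + 1))

def contain3 (s : String) (t : String) : Bool :=
  scanA (buildState t.toList) (PySem.List.len t.toList) s.toList 0 (-1)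

-- ===== PORT B =====
-- `x in it` on a consuming iterator: drop elements of ts until x is found, return the rest.
def findSkip (x : Char) : List Char → Option (List Char)
  | [] => none
  | y :: ys => if y = x then some ys else findSkip x ys

-- `all(ch in it for ch in s)`
def scanB : List Char → List Char → Bool
  | [], _ => true
  | x :: rest, ts =>
    match findSkip x ts with
    | none => false
    | some ts' => scanB rest ts'

def contain3_alt (s : String) (t : String) : Bool :=
  scanB s.toList t.toList

-- ===== PRECONDITION & SPEC =====
-- Pre_ restricts to the inputs where A's accidental row aliasing cannot matter: both strings
-- over 'G'..'z' (outside that range A's ord(c)-97 row indexing raises IndexError) with no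
-- char of s differing by exactly 26 from a char of t (A's table, indexed by ord(c)-97 with
-- Python's negative wraparound, accidentally identifies such pairs, e.g. 'G' with 'a'); it
-- also keeps every input with empty t (A returns False at once, before reading s) and the
-- inputs whose admissible first s-char shares a row with no char of t, where A returns False
-- before ever reading the rest of s.
def charOk (c : Char) : Bool := 71 ≤ c.toNat && c.toNat ≤ 122
def rowOf (c : Char) : ℕ := (c.toNat - 71) % 26
def Pre_contain3 (s : String) (t : String) : Prop :=
  (t.toList.isEmpty
    || (s.toList.all charOk && t.toList.all charOk
      && s.toList.all (fun c => t.toList.all (fun d =>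
           !(c.toNat + 26 == d.toNat) && !(d.toNat + 26 == c.toNat))))
    || (t.toList.all charOk && !s.toList.isEmpty && charOk (s.toList.headD 'a')
        && t.toList.all (fun d => !(rowOf d == rowOf (s.toList.headD 'a'))))) = true
instance (s : String) (t : String) : Decidable (Pre_contain3 s t) := by
  unfold Pre_contain3; infer_instance

def pvWitness_contain3 : String × String := ("ace", "abcde")

-- On empty s, A returns False although the empty string is a subsequence of every t;
-- B returns True, the conventionally intended value.
def D_contain3 (s : String) (t : String) : Prop := s = ""
instance (s : String) (t : String) : Decidable (D_contain3 s t) := by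
  unfold D_contain3; infer_instance

def Spec_contain3 (s : String) (t : String) (out : Bool) : Prop :=
  ¬ D_contain3 s t → out = contain3_alt s t
instance (s : String) (t : String) (out : Bool) : Decidable (Spec_contain3 s t out) := by
  unfold Spec_contain3; infer_instance

def pvDiffWitness_contain3 : String × String := ("", "b")
def pvDiffWitnessOut_contain3 : Bool × Bool := (false, true)

-- ===== CLAIM =====
def Claim_unchanged_contain3 : Prop := ∀ (s : String) (t : String), Dom_contain3 s t → Pre_contain3 s t → Spec_contain3 s t (contain3 s t)
def Claim_changed_contain3 : Prop := Dom_contain3 (pvDiffWitness_contain3.1) (pvDiffWitness_contain3.2) ∧ Pre_contain3 (pvDiffWitness_contain3.1) (pvDiffWitness_contain3.2) ∧ D_contain3 (pvDiffWitness_contain3.1) (pvDiffWitness_contain3.2) ∧ contain3 (pvDiffWitness_contain3.1) (pvDiffWitness_contain3.2) = pvDiffWitnessOut_contain3.1 ∧ contain3_alt (pvDiffWitness_contain3.1) (pvDiffWitness_contain3.2) = pvDiffWitnessOut_contain3.2 ∧ pvDiffWitnessOut_contain3.1 ≠ pvDiffWitnessOut_contain3.2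
def Claim_exact_contain3 : Prop := ∀ (s : String) (t : String), Dom_contain3 s t → Pre_contain3 s t → D_contain3 s t → contain3 s t ≠ contain3_alt s t

-- ===== LEMMAS AND PROOFS =====

-- next occurrence of row r in tl at position ≥ k, or -1 (spec of A's table column semantics)
def nxtR (tl : List Char) (r : ℕ) (k : ℕ) : Int :=
  if h : k < tl.length then
    (if rowOf tl[k] = r then (k : Int) else nxtR tl r (k + 1))
  else -1
termination_by tl.length - k

-- negative-index write: xs[-k] = v  (0 < k ≤ len xs)
lemma pySetD_negNat {α : Type} (xs : List α) (k : ℕ) (v : α) (h1 : k ≠ 0) (h2 : k ≤ xs.length) :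
    PySem.List.pySetD xs (-(k : Int)) v = xs.set (xs.length - k) v := by
  simp [PySem.List.pySetD, PySem.List.pySet?, PySem.List.pyIdx?, h1, h2]

lemma charOk_bounds (c : Char) (hc : charOk c = true) : 71 ≤ c.toNat ∧ c.toNat ≤ 122 := by
  simpa [charOk] using hc

-- for admissible non-aliasing chars the row determines the char
lemma row_iff (c d : Char) (hc : charOk c = true) (hd : charOk d = true)
    (hna : c.toNat + 26 ≠ d.toNat ∧ d.toNat + 26 ≠ c.toNat) :
    rowOf d = rowOf c ↔ d = c := by
  have hbc := charOk_bounds c hc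
  have hbd := charOk_bounds d hd
  constructor
  · intro h
    have : d.toNat = c.toNat := by simp only [rowOf] at h; omega
    exact Char.ext (UInt32.toNat_inj.mp this)
  · intro h; rw [h]

-- Python indexing `state[ord(c) - 97]` on the 26-row state selects row `rowOf c`
lemma mrow_get (st : List (List Int)) (h : st.length = 26) (c : Char) (hc : charOk c = true) :
    PySem.List.pyGetD st ((c.toNat : Int) - 97) [] = st.getD (rowOf c) [] := by
  have hb := charOk_bounds c hc
  by_cases h97 : 97 ≤ c.toNat
  · rw [show ((c.toNat : Int) - 97) = ((c.toNat - 97 : ℕ) : Int) by omega,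
        PySem.List.pyGetD_natCast, show rowOf c = c.toNat - 97 by simp only [rowOf]; omega]
  · rw [show ((c.toNat : Int) - 97) = -((97 - c.toNat : ℕ) : Int) by omega,
        PySem.List.pyGetD_neg_natCast st (97 - c.toNat) [] (by omega) (by rw [h]; omega)]
    have hidx : st.length - (97 - c.toNat) = rowOf c := by rw [h]; simp only [rowOf]; omega
    rw [List.getD_eq_getElem st [] (n := rowOf c) (by rw [h]; simp only [rowOf]; omega)]
    simp only [hidx]

lemma mrow_set (st : List (List Int)) (v : List Int) (h : st.length = 26) (c : Char)
    (hc : charOk c = true) :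
    PySem.List.pySetD st ((c.toNat : Int) - 97) v = st.set (rowOf c) v := by
  have hb := charOk_bounds c hc
  by_cases h97 : 97 ≤ c.toNat
  · rw [show ((c.toNat : Int) - 97) = ((c.toNat - 97 : ℕ) : Int) by omega,
        PySem.List.pySetD_natCast, show rowOf c = c.toNat - 97 by simp only [rowOf]; omega]
  · rw [show ((c.toNat : Int) - 97) = -((97 - c.toNat : ℕ) : Int) by omega,
        pySetD_negNat st (97 - c.toNat) v (by omega) (by rw [h]; omega)]
    have hidx : st.length - (97 - c.toNat) = rowOf c := by rw [h]; simp only [rowOf]; omega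
    rw [hidx]

-- A's inner `for j in range(26)` loop: each iteration rewrites only row j, so the fold maps f over the first m rows
lemma foldRows (f : List Int → List Int) :
    ∀ (m : ℕ) (st : List (List Int)), m ≤ st.length →
      ((PySem.List.pyRange 0 (m : Int) 1).foldl
          (fun st2 j => PySem.List.pySetD st2 j (f (PySem.List.pyGetD st2 j []))) st)
        = st.mapIdx (fun j row => if j < m then f row else row) := by
  intro m
  induction m with
  | zero =>
      intro st _
      simp [PySem.List.pyRange_one_eq_nil]
      apply List.ext_getElem (by simp)
      intro k h1 h2
      simp
  | succ m ih =>
      intro st hm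
      have hcast : ((m + 1 : ℕ) : Int) = (m : Int) + 1 := by push_cast; ring
      rw [hcast, PySem.List.pyRange_one_succ_right (by positivity), List.foldl_append]
      rw [ih st (by omega)]
      simp only [List.foldl_cons, List.foldl_nil]
      have hmlt : m < st.length := by omega
      have hget : PySem.List.pyGetD (st.mapIdx fun j row => if j < m then f row else row) (m : Int) []
          = st[m] := by
        rw [PySem.List.pyGetD_natCast]
        rw [List.getD_eq_getElem _ _ (by simpa using hmlt)]
        simp [List.getElem_mapIdx]
      rw [hget, PySem.List.pySetD_natCast]
      apply List.ext_getElem (by simp)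
      intro k h1 h2
      simp only [List.getElem_set, List.getElem_mapIdx]
      by_cases hk : k = m
      · subst hk; simp
      · rw [if_neg (fun h => hk h.symm)]
        by_cases hlt : k < m
        · rw [if_pos hlt, if_pos (by omega)]
        · rw [if_neg hlt, if_neg (by omega)]

-- the inner loop over all 26 rows is a map over the whole (length-26) state
lemma foldRows26 (f : List Int → List Int) (st : List (List Int)) (h : st.length = 26) :
    ((PySem.List.pyRange 0 26 1).foldl
        (fun st2 j => PySem.List.pySetD st2 j (f (PySem.List.pyGetD st2 j []))) st)
      = st.map f := by
  have h26 : (26 : Int) = ((26 : ℕ) : Int) := by norm_num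
  rw [h26, foldRows f 26 st (by omega)]
  apply List.ext_getElem (by simp)
  intro k h1 h2
  simp only [List.getElem_mapIdx, List.getElem_map]
  have : k < 26 := by simpa [h] using (by simpa using h1 : k < st.length)
  simp [this]

-- the state reached after the first n iterations of A's build loop
def stAfter (tl : List Char) (n : ℕ) : List (List Int) :=
  (PySem.List.pyRange 1 ((n : Int) + 1) 1).foldl (buildStep tl (tl.length : Int))
    ((PySem.List.pyRange 0 26 1).map (fun _ => List.replicate tl.length (-1)))

lemma buildState_eq (tl : List Char) : buildState tl = stAfter tl tl.length := by
  simp [buildState, stAfter]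

lemma stAfter_zero (tl : List Char) :
    stAfter tl 0 = (PySem.List.pyRange 0 26 1).map (fun _ => List.replicate tl.length (-1)) := by
  simp [stAfter, PySem.List.pyRange_one_eq_nil]

lemma stAfter_succ (tl : List Char) (n : ℕ) :
    stAfter tl (n + 1) = buildStep tl (tl.length : Int) (stAfter tl n) ((n : Int) + 1) := by
  unfold stAfter
  have hcast : ((n + 1 : ℕ) : Int) + 1 = ((n : Int) + 1) + 1 := by push_cast; ring
  rw [hcast, PySem.List.pyRange_one_succ_right (by omega), List.foldl_append]
  simp

-- invariant of the build loop: after n iterations the last n columns hold next-occurrence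
-- values and the rest are still -1
def BuildInv (tl : List Char) (n : ℕ) (st : List (List Int)) : Prop :=
  st.length = 26 ∧
  (∀ r, r < 26 → (st.getD r []).length = tl.length) ∧
  (∀ r, r < 26 → ∀ k, k < tl.length →
    (st.getD r []).getD k (-1) = if tl.length - n ≤ k then nxtR tl r k else -1)

lemma nxtR_of_ge (tl : List Char) (r k : ℕ) (h : tl.length ≤ k) : nxtR tl r k = -1 := by
  rw [nxtR]; simp [show ¬ k < tl.length by omega]

lemma nxtR_step (tl : List Char) (r p : ℕ) (hp : p < tl.length) :
    nxtR tl r p = if rowOf (tl[p]'hp) = r then (p : Int) else nxtR tl r (p + 1) := by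
  rw [nxtR, dif_pos hp]

-- the inner 26-row loop of buildStep, as a map over the state's rows
lemma foldRows26' (i : Int) (st : List (List Int)) (h : st.length = 26) :
    ((PySem.List.pyRange 0 26 1).foldl (fun st2 j => mset st2 j (-i) (mget st2 j (-i + 1))) st)
      = st.map (fun row => PySem.List.pySetD row (-i) (PySem.List.pyGetD row (-i + 1) (-1))) := by
  have := foldRows26 (fun row => PySem.List.pySetD row (-i) (PySem.List.pyGetD row (-i + 1) (-1))) st h
  simpa [mset, mget] using this

lemma inv_holds (tl : List Char) (hlow : ∀ c ∈ tl, charOk c = true) :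
    ∀ n, n ≤ tl.length → BuildInv tl n (stAfter tl n) := by
  intro n
  induction n with
  | zero =>
      intro _
      rw [stAfter_zero]
      have hlen0 : ((PySem.List.pyRange 0 26 1).map
          (fun _ => List.replicate tl.length (-1 : Int))).length = 26 := by
        rw [List.length_map, PySem.List.length_pyRange_one]; rfl
      have hrowr : ∀ r, r < 26 → ((PySem.List.pyRange 0 26 1).map
            (fun _ => List.replicate tl.length (-1 : Int))).getD r []
          = List.replicate tl.length (-1 : Int) := by
        intro r hr
        rw [List.getD_eq_getElem _ _ (by omega), List.getElem_map]
      refine ⟨hlen0, ?_, ?_⟩ <;> intro r hr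
      · rw [hrowr r hr, List.length_replicate]
      · intro k hk
        rw [hrowr r hr, List.getD_eq_getElem _ _ (by simpa using hk), List.getElem_replicate,
            if_neg (by omega)]
  | succ n ih =>
      intro hn1
      have hn : n ≤ tl.length := by omega
      obtain ⟨hlen, hrow, hval⟩ := ih hn
      rw [stAfter_succ]
      set S := stAfter tl n with hS
      clear_value S
      have hcopy : ∀ r, r < 26 →
          PySem.List.pyGetD (S.getD r []) (-((n : Int) + 1) + 1) (-1) = nxtR tl r (tl.length - n) := by
        intro r hr
        rw [show -((n : Int) + 1) + 1 = -(n : Int) by ring]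
        rcases Nat.eq_zero_or_pos n with h0 | hpos
        · subst h0
          simp only [Nat.cast_zero, neg_zero, PySem.List.pyGetD_zero]
          rw [hval r hr 0 (by omega), if_neg (by omega), nxtR_of_ge tl r (tl.length - 0) (by omega)]
        · rw [PySem.List.pyGetD_neg_natCast (S.getD r []) n (-1) (by omega)
              (by rw [hrow r hr]; omega)]
          have hlenr := hrow r hr
          have hv := hval r hr (tl.length - n) (by omega)
          rw [if_pos (by omega)] at hv
          simp only [hlenr]
          rw [← hv]
          exact (List.getD_eq_getElem _ (-1) (by rw [hlenr]; omega)).symm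
      have hchar : PySem.List.pyGetD tl (-((n : Int) + 1)) 'a' = tl[tl.length - (n + 1)]'(by omega) := by
        rw [show -((n : Int) + 1) = -(((n + 1 : ℕ)) : Int) by push_cast; ring,
            PySem.List.pyGetD_neg_natCast tl (n + 1) 'a' (by omega) (by omega)]
      set cch : Char := tl[tl.length - (n + 1)]'(by omega) with hcch
      have hclow : charOk cch = true := hlow _ (List.getElem_mem _)
      have hcbounds : 71 ≤ cch.toNat ∧ cch.toNat ≤ 122 := charOk_bounds cch hclow
      have hr0lt : rowOf cch < 26 := by simp only [rowOf]; omega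
      have hsetneg : ∀ (row : List Int) (v : Int), row.length = tl.length →
          PySem.List.pySetD row (-((n : Int) + 1)) v = row.set (tl.length - (n + 1)) v := by
        intro row v hrl
        rw [show -((n : Int) + 1) = -(((n + 1 : ℕ)) : Int) by push_cast; ring,
            pySetD_negNat row (n + 1) v (by omega) (by omega), hrl]
      have hstep : buildStep tl (tl.length : Int) S ((n : Int) + 1)
          = (S.map (fun row => PySem.List.pySetD row (-((n : Int) + 1)) (PySem.List.pyGetD row (-((n : Int) + 1) + 1) (-1)))).set (rowOf cch)
              ((PySem.List.pySetD (S.getD (rowOf cch) []) (-((n : Int) + 1)) (PySem.List.pyGetD (S.getD (rowOf cch) []) (-((n : Int) + 1) + 1) (-1))).set (tl.length - (n + 1)) ((tl.length - (n + 1) : ℕ) : Int)) := by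
        unfold buildStep
        rw [foldRows26' ((n : Int) + 1) S hlen, mset, hchar,
            mrow_get _ (by rw [List.length_map, hlen]) cch hclow,
            mrow_set _ _ (by rw [List.length_map, hlen]) cch hclow]
        have hgr0 : (S.map (fun row => PySem.List.pySetD row (-((n : Int) + 1)) (PySem.List.pyGetD row (-((n : Int) + 1) + 1) (-1)))).getD (rowOf cch) [] = PySem.List.pySetD (S.getD (rowOf cch) []) (-((n : Int) + 1)) (PySem.List.pyGetD (S.getD (rowOf cch) []) (-((n : Int) + 1) + 1) (-1)) := by
          rw [List.getD_eq_getElem (S.map (fun row => PySem.List.pySetD row (-((n : Int) + 1)) (PySem.List.pyGetD row (-((n : Int) + 1) + 1) (-1)))) [] (by rw [List.length_map, hlen]; omega),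
              List.getElem_map, List.getD_eq_getElem S [] (by rw [hlen]; omega)]
        rw [hgr0, show (tl.length : Int) - ((n : Int) + 1) = ((tl.length - (n + 1) : ℕ) : Int) by omega,
            hsetneg _ _ (by rw [PySem.List.length_pySetD]; exact hrow _ hr0lt)]
      rw [hstep]
      have hrows : ∀ r, r < 26 →
          (((S.map (fun row => PySem.List.pySetD row (-((n : Int) + 1)) (PySem.List.pyGetD row (-((n : Int) + 1) + 1) (-1)))).set (rowOf cch)
              ((PySem.List.pySetD (S.getD (rowOf cch) []) (-((n : Int) + 1)) (PySem.List.pyGetD (S.getD (rowOf cch) []) (-((n : Int) + 1) + 1) (-1))).set (tl.length - (n + 1)) ((tl.length - (n + 1) : ℕ) : Int))).getD r [])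
            = if r = rowOf cch
              then (PySem.List.pySetD (S.getD (rowOf cch) []) (-((n : Int) + 1)) (PySem.List.pyGetD (S.getD (rowOf cch) []) (-((n : Int) + 1) + 1) (-1))).set (tl.length - (n + 1)) ((tl.length - (n + 1) : ℕ) : Int)
              else PySem.List.pySetD (S.getD r []) (-((n : Int) + 1)) (PySem.List.pyGetD (S.getD r []) (-((n : Int) + 1) + 1) (-1)) := by
        intro r hr
        rw [List.getD_eq_getElem _ [] (by rw [List.length_set, List.length_map, hlen]; omega),
            List.getElem_set]
        by_cases hrr : r = rowOf cch
        · simp [hrr]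
        · rw [if_neg (fun h => hrr h.symm), if_neg hrr, List.getElem_map,
              List.getD_eq_getElem S [] (n := r) (by rw [hlen]; omega)]
      have hfval : ∀ r, r < 26 → ∀ k, k < tl.length →
          (PySem.List.pySetD (S.getD r []) (-((n : Int) + 1)) (PySem.List.pyGetD (S.getD r []) (-((n : Int) + 1) + 1) (-1))).getD k (-1)
            = if k = tl.length - (n + 1) then nxtR tl r (tl.length - n)
              else (S.getD r []).getD k (-1) := by
        intro r hr k hk
        rw [hcopy r hr, hsetneg _ _ (hrow r hr),
            List.getD_eq_getElem _ (-1) (n := k) (by rw [List.length_set, hrow r hr]; omega),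
            List.getElem_set]
        by_cases hkk : k = tl.length - (n + 1)
        · simp [hkk]
        · rw [if_neg (fun h => hkk h.symm), if_neg hkk,
              List.getD_eq_getElem (S.getD r []) (-1) (n := k) (by rw [hrow r hr]; omega)]
      refine ⟨by rw [List.length_set, List.length_map, hlen], ?_, ?_⟩
      · intro r hr
        rw [hrows r hr]
        by_cases hrr : r = rowOf cch
        · rw [if_pos hrr, List.length_set, PySem.List.length_pySetD, hrow _ hr0lt]
        · rw [if_neg hrr, PySem.List.length_pySetD, hrow r hr]
      · intro r hr k hk
        rw [hrows r hr]
        by_cases hrr : r = rowOf cch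
        · subst hrr
          rw [if_pos rfl,
              List.getD_eq_getElem _ (-1) (n := k)
                (by rw [List.length_set, PySem.List.length_pySetD, hrow _ hr0lt]; omega),
              List.getElem_set]
          by_cases hkk : tl.length - (n + 1) = k
          · rw [if_pos hkk, ← hkk, if_pos (by omega),
                nxtR_step tl (rowOf cch) (tl.length - (n + 1)) (by omega), if_pos rfl]
          · rw [if_neg hkk,
                ← List.getD_eq_getElem _ (-1) (n := k)
                  (by rw [PySem.List.length_pySetD, hrow _ hr0lt]; omega),
                hfval (rowOf cch) hr0lt k hk, if_neg (fun h => hkk h.symm),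
                hval (rowOf cch) hr0lt k hk]
            by_cases hge : tl.length - n ≤ k
            · rw [if_pos hge, if_pos (by omega)]
            · rw [if_neg hge, if_neg (by omega)]
        · rw [if_neg hrr, hfval r hr k hk]
          by_cases hkk : k = tl.length - (n + 1)
          · rw [if_pos hkk, if_pos (by omega), hkk,
                nxtR_step tl r (tl.length - (n + 1)) (by omega),
                if_neg (fun h => hrr h.symm),
                show tl.length - (n + 1) + 1 = tl.length - n by omega]
          · rw [if_neg hkk, hval r hr k hk]
            by_cases hge : tl.length - n ≤ k
            · rw [if_pos hge, if_pos (by omega)]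
            · rw [if_neg hge, if_neg (by omega)]

-- final table characterization: A's table lookup is the next occurrence of c at position ≥ p
lemma table_get (tl : List Char) (hlow : ∀ c ∈ tl, charOk c = true) (c : Char)
    (hc : charOk c = true) (p : ℕ) (hp : p < tl.length) :
    mget (buildState tl) ((c.toNat : Int) - 97) (p : Int) = nxtR tl (rowOf c) p := by
  obtain ⟨hlen, hrow, hval⟩ := inv_holds tl hlow tl.length le_rfl
  have hb := charOk_bounds c hc
  have hr : rowOf c < 26 := by simp only [rowOf]; omega
  rw [buildState_eq, mget, mrow_get _ hlen c hc, PySem.List.pyGetD_natCast]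
  rw [hval (rowOf c) hr p hp, if_pos (by omega)]

-- A's next-occurrence value and B's consuming search agree, given that within tl the row
-- of c identifies exactly c
lemma nxt_find (tl : List Char) (c : Char)
    (hsep : ∀ d ∈ tl, (rowOf d = rowOf c ↔ d = c)) :
    ∀ d p, tl.length - p ≤ d →
      (nxtR tl (rowOf c) p = -1 ∧ findSkip c (tl.drop p) = none) ∨
      (∃ q, p ≤ q ∧ ∃ hq : q < tl.length, nxtR tl (rowOf c) p = (q : Int) ∧
        findSkip c (tl.drop p) = some (tl.drop (q + 1))) := by
  intro d
  induction d with
  | zero =>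
      intro p hp
      left
      rw [nxtR_of_ge tl _ p (by omega), List.drop_eq_nil_of_le (by omega)]
      exact ⟨rfl, rfl⟩
  | succ d ih =>
      intro p hp
      by_cases hpL : p < tl.length
      · have hdrop : tl.drop p = tl[p] :: tl.drop (p + 1) := List.drop_eq_getElem_cons hpL
        have hiff : (tl[p]'hpL = c) ↔ (rowOf (tl[p]'hpL) = rowOf c) :=
          (hsep _ (List.getElem_mem hpL)).symm
        by_cases he : rowOf (tl[p]'hpL) = rowOf c
        · right
          refine ⟨p, le_rfl, hpL, ?_, ?_⟩
          · rw [nxtR_step tl (rowOf c) p hpL, if_pos he]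
          · rw [hdrop, findSkip, if_pos (hiff.mpr he)]
        · rcases ih (p + 1) (by omega) with ⟨h1, h2⟩ | ⟨q, hq1, hq2, hq4, hq5⟩
          · left
            rw [nxtR_step tl (rowOf c) p hpL, if_neg he, hdrop, findSkip,
                if_neg (fun hh => he (hiff.mp hh))]
            exact ⟨h1, h2⟩
          · right
            refine ⟨q, by omega, hq2, ?_, ?_⟩
            · rw [nxtR_step tl (rowOf c) p hpL, if_neg he]; exact hq4
            · rw [hdrop, findSkip, if_neg (fun hh => he (hiff.mp hh))]
              exact hq5
      · left
        rw [nxtR_of_ge tl _ p (by omega), List.drop_eq_nil_of_le (by omega)]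
        exact ⟨rfl, rfl⟩

-- once A's index is -1 past the first step, the scan returns False
lemma scanA_neg (state : List (List Int)) (l : Int) :
    ∀ (rest : List Char) (i : Int), i ≠ 0 → scanA state l rest i (-1) = false := by
  intro rest i hi
  cases rest with
  | nil => rw [scanA]; simp
  | cons c r => rw [scanA]; simp [hi]

-- main loop agreement: A at matched position m ↔ B on the remaining suffix of t
lemma scan_agree (tl : List Char) (hlow : ∀ c ∈ tl, charOk c = true) :
    ∀ rest : List Char,
      (∀ c ∈ rest, charOk c = true ∧ ∀ d ∈ tl, (rowOf d = rowOf c ↔ d = c)) → ∀ (i : Int), 1 ≤ i →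
      ∀ (m : ℕ), m < tl.length →
        scanA (buildState tl) (tl.length : Int) rest i (m : Int)
          = scanB rest (tl.drop (m + 1)) := by
  intro rest
  induction rest with
  | nil =>
      intro _ i hi m hm
      rw [scanA, scanB, if_neg (by omega : ¬ (m : Int) = -1)]
  | cons c rest' ih =>
      intro hlows i hi m hm
      have hc : charOk c = true := (hlows c List.mem_cons_self).1
      have hsep : ∀ d ∈ tl, (rowOf d = rowOf c ↔ d = c) := (hlows c List.mem_cons_self).2
      have hlows' : ∀ x ∈ rest', charOk x = true ∧ ∀ d ∈ tl, (rowOf d = rowOf x ↔ d = x) :=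
        fun x hx => hlows x (List.mem_cons_of_mem _ hx)
      rw [scanA]
      by_cases hml : m = tl.length - 1
      · rw [if_pos (Or.inr (by omega))]
        rw [List.drop_eq_nil_of_le (by omega), scanB]
        rfl
      · rw [if_neg (by push_neg; exact ⟨fun h => absurd h (by omega), by omega⟩)]
        have hm1 : m + 1 < tl.length := by omega
        rw [show (m : Int) + 1 = ((m + 1 : ℕ) : Int) by push_cast; ring]
        rw [table_get tl hlow c hc (m + 1) hm1, scanB]
        rcases nxt_find tl c hsep tl.length (m + 1) (by omega) with
          ⟨h1, h2⟩ | ⟨q, hq1, hq2, hq4, hq5⟩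
        · rw [h1, h2]
          exact scanA_neg _ _ rest' (i + 1) (by omega)
        · rw [hq4, hq5]
          exact ih hlows' (i + 1) (by omega) q hq2

lemma findSkip_mem {x : Char} : ∀ {ys zs : List Char}, findSkip x ys = some zs → x ∈ ys := by
  intro ys
  induction ys with
  | nil => intro zs h; simp [findSkip] at h
  | cons y ys ih =>
      intro zs h
      rw [findSkip] at h
      by_cases hy : y = x
      · subst hy; exact List.mem_cons_self
      · rw [if_neg hy] at h
        exact List.mem_cons_of_mem _ (ih h)

-- ===== VERDICT =====
theorem contain3_spec : Claim_unchanged_contain3 := by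
  intro s t _ hpre
  unfold Spec_contain3
  intro hD
  unfold Pre_contain3 at hpre
  simp only [Bool.or_eq_true, Bool.and_eq_true, List.all_eq_true] at hpre
  unfold contain3 contain3_alt
  simp only [PySem.List.len_eq]
  cases hsl : s.toList with
  | nil => exact absurd (String.toList_eq_nil_iff.mp hsl) hD
  | cons c rest =>
      set tl := t.toList with htl
      rw [scanA]
      by_cases hL : tl.length = 0
      · -- t = "": the guard index == l - 1 fires at i = 0, and B finds nothing in []
        rw [if_pos (Or.inr (by omega))]
        rw [List.length_eq_zero_iff.mp hL, scanB]
        simp [findSkip]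
      · rw [if_neg (by push_neg; exact ⟨fun _ => rfl, by omega⟩)]
        rw [show (-1 : Int) + 1 = ((0 : ℕ) : Int) by norm_num]
        rcases hpre with (he | ⟨⟨hps, hpt⟩, hna⟩) | ⟨⟨⟨hpt, -⟩, hchd⟩, hmiss⟩
        · exact absurd (by rw [List.isEmpty_iff.mp he]; rfl) hL
        · -- admissible alias-free chars: the two scans agree step for step
          have hsepAll : ∀ x ∈ s.toList, charOk x = true ∧
              ∀ d ∈ tl, (rowOf d = rowOf x ↔ d = x) := by
            intro x hx
            refine ⟨hps x hx, fun d hd => ?_⟩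
            have h1 := hna x hx d hd
            simp only [Bool.and_eq_true, Bool.not_eq_true', beq_eq_false_iff_ne] at h1
            exact row_iff x d (hps x hx) (hpt d hd) h1
          have hc : charOk c = true := (hsepAll c (by rw [hsl]; exact List.mem_cons_self)).1
          have hsep := (hsepAll c (by rw [hsl]; exact List.mem_cons_self)).2
          have hrest : ∀ x ∈ rest, charOk x = true ∧ ∀ d ∈ tl, (rowOf d = rowOf x ↔ d = x) :=
            fun x hx => hsepAll x (by rw [hsl]; exact List.mem_cons_of_mem _ hx)
          rw [table_get tl hpt c hc 0 (by omega), scanB]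
          rcases nxt_find tl c hsep tl.length 0 (by omega) with
            ⟨h1, h2⟩ | ⟨q, hq1, hq2, hq4, hq5⟩
          · rw [List.drop_zero] at h2
            rw [h1, h2]
            exact scanA_neg _ _ rest 1 one_ne_zero
          · rw [List.drop_zero] at hq5
            rw [hq4, hq5]
            exact scan_agree tl hpt rest hrest 1 le_rfl q hq2
        · -- s's first char shares a row with no char of t: both scans fail on it at once
          rw [hsl] at hchd hmiss
          simp only [List.headD_cons] at hchd hmiss
          have hmiss' : ∀ d ∈ tl, rowOf d ≠ rowOf c := by
            intro d hd
            have := hmiss d hd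
            simpa using this
          have hsep : ∀ d ∈ tl, (rowOf d = rowOf c ↔ d = c) := by
            intro d hd
            exact ⟨fun h => absurd h (hmiss' d hd),
                   fun h => absurd (by rw [h]) (hmiss' d hd)⟩
          rw [table_get tl hpt c hchd 0 (by omega), scanB]
          rcases nxt_find tl c hsep tl.length 0 (by omega) with
            ⟨h1, h2⟩ | ⟨q, hq1, hq2, hq4, hq5⟩
          · rw [List.drop_zero] at h2
            rw [h1, h2]
            exact scanA_neg _ _ rest 1 one_ne_zero
          · rw [List.drop_zero] at hq5
            have hcm : c ∈ tl := findSkip_mem hq5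
            exact absurd rfl (hmiss' c hcm)

theorem contain3_changed : Claim_changed_contain3 := by
  unfold Claim_changed_contain3
  refine ⟨by decide, by decide, by decide, by rfl, by decide, by decide⟩

theorem contain3_tight : Claim_exact_contain3 := by
  intro s t _ _ hD
  have hs : s.toList = [] := by
    unfold D_contain3 at hD; subst hD; simp
  unfold contain3 contain3_alt
  rw [hs]
  simp [scanA, scanB]
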